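-- pv_equiv track=rewrite | github.com/MrBrantCode/unitest_baseline | mut_generate/mist_train_taco/taco_9174/solution.py | count_qualifying_pairs
-- ===== SOURCE A (Python) =====
-- def count_qualifying_pairs(heights, K, queries):
--     N = len(heights)
--     fights = [[0] * (N - i) for i in range(N)]
--
--     for sumo1, height1 in enumerate(heights):
--         num_fights = 0
--         for sumo2 in range(sumo1 + 1, N):
--             if abs(height1 - heights[sumo2]) <= K:
--                 num_fights += 1
--             fights[sumo1][sumo2 - sumo1] = num_fights
--
--     results = []
--     for l, r in queries:
--         result = sum(fights[sumo][r - sumo] for sumo in range(l, r))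
--         results.append(result)
--
--     return results
-- ===== SOURCE B (Python) =====
-- def count_qualifying_pairs(heights, K, queries):
--     results = []
--     for l, r in queries:
--         if l >= r or K < 0:
--             results.append(0)
--             continue
--         w = sorted(heights[l:r + 1])
--         total = 0
--         for j in range(1, len(w)):
--             target = w[j] - K
--             lo, hi = 0, j
--             while lo < hi:
--                 mid = (lo + hi) // 2
--                 if w[mid] < target:
--                     lo = mid + 1
--                 else:
--                     hi = mid
--             total += j - lo
--         results.append(total)
--     return results
-- ===== Notes on version B (the rewrite author's own statement) =====
-- stated objective: faster
-- what changed: B drops A's O(N^2) precomputed triangular fights table entirely and instead answers each query on its own by sorting the queried window and, for each element, counting in-window partners within [h-K, h+K] by a hand-written binary search (lower bound), so cost depends on window size, not on N^2.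
-- outside the precondition, e.g. on count_qualifying_pairs([1, 2], 1, [(-2, -1)]): A returns [1], B returns [0]
import Mathlib
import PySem

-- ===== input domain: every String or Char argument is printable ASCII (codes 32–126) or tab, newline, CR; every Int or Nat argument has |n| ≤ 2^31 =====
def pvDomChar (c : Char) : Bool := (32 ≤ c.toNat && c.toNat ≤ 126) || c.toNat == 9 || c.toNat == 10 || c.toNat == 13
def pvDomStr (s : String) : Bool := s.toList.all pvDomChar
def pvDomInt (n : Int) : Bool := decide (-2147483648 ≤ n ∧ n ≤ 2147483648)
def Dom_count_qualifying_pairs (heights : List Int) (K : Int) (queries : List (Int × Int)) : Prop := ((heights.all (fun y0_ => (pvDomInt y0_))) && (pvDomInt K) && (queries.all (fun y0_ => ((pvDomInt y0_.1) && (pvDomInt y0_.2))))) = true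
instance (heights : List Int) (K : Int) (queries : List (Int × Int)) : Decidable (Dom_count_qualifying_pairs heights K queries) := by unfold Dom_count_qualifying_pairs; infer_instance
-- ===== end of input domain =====

-- B answers each query by sorting the queried window and binary-searching the value window,
-- instead of A's O(N^2) precomputed triangular table; equivalence is proved on Pre_ below.

-- ===== PORT A =====
-- inner loop body: 'if abs(height1 - heights[sumo2]) <= K: num_fights += 1; fights[sumo1][sumo2-sumo1] = num_fights'
def pvAInner (heights : List Int) (K : Int) (sumo1 height1 : Int) (st : Int × List Int) (sumo2 : Int) : Int × List Int :=
  let num := if |height1 - PySem.List.pyGetD heights sumo2 0| ≤ K then st.1 + 1 else st.1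
  (num, PySem.List.pySetD st.2 (sumo2 - sumo1) num)

-- outer loop body over 'enumerate(heights)': runs the inner loop on row sumo1 and stores it back
def pvAOuter (heights : List Int) (K : Int) (fights : List (List Int)) (p : Int × Int) : List (List Int) :=
  let st := (PySem.List.pyRange (p.1 + 1) (heights.length : Int) 1).foldl
      (pvAInner heights K p.1 p.2) (0, PySem.List.pyGetD fights p.1 [])
  PySem.List.pySetD fights p.1 st.2

def count_qualifying_pairs (heights : List Int) (K : Int) (queries : List (Int × Int)) : List Int :=
  let N : Int := (heights.length : Int)
  let fights0 : List (List Int) := (PySem.List.pyRange 0 N 1).map (fun i => List.replicate (N - i).toNat 0)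
  let fights := (PySem.List.enumerate heights 0).foldl (pvAOuter heights K) fights0
  queries.foldl (fun results q =>
    results ++ [(PySem.List.pyRange q.1 q.2 1).foldl
      (fun acc sumo => acc + PySem.List.pyGetD (PySem.List.pyGetD fights sumo []) (q.2 - sumo) 0) 0]) []

-- ===== PORT B =====
-- hand-written lower-bound binary search, as in Source B ('while lo < hi: ...')
def pvBisect (w : List Int) (target : Int) (lo hi : Nat) : Nat :=
  if h : lo < hi then
    let mid := (lo + hi) / 2
    if PySem.List.pyGetD w (mid : Int) 0 < target then pvBisect w target (mid + 1) hi
    else pvBisect w target lo mid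
  else lo
termination_by hi - lo
decreasing_by all_goals omega

def count_qualifying_pairs_alt (heights : List Int) (K : Int) (queries : List (Int × Int)) : List Int :=
  queries.foldl (fun results q =>
    if q.1 ≥ q.2 ∨ K < 0 then results ++ [0]
    else
      let w := PySem.List.sorted (PySem.List.slice heights (some q.1) (some (q.2 + 1))) (fun x => x) false
      let total := (PySem.List.pyRange 1 (w.length : Int) 1).foldl (fun total j =>
          let target := PySem.List.pyGetD w j 0 - K
          let lo := pvBisect w target 0 j.toNat
          total + (j - (lo : Int))) 0
      results ++ [total]) []

-- ===== PRECONDITION & SPEC =====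
-- Pre_ excludes queries with a nonempty index range (l < r) reaching outside 0..len-1: there A
-- raises IndexError, except when both endpoints are negative, where A returns an accidental
-- negative-index-wraparound value (it answers the wrapped query (l+N, r+N)).
def Pre_count_qualifying_pairs (heights : List Int) (K : Int) (queries : List (Int × Int)) : Prop :=
  ∀ q ∈ queries, q.2 ≤ q.1 ∨ (0 ≤ q.1 ∧ q.2 < (heights.length : Int))
instance (heights : List Int) (K : Int) (queries : List (Int × Int)) : Decidable (Pre_count_qualifying_pairs heights K queries) := by unfold Pre_count_qualifying_pairs; infer_instance

def pvWitness_count_qualifying_pairs : List Int × Int × (List (Int × Int)) := ([1, 2, 3], 1, [(0, 2), (2, 1), (1, 2)])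

def Spec_count_qualifying_pairs (heights : List Int) (K : Int) (queries : List (Int × Int)) (out : List Int) : Prop := out = count_qualifying_pairs_alt heights K queries
instance (heights : List Int) (K : Int) (queries : List (Int × Int)) (out : List Int) : Decidable (Spec_count_qualifying_pairs heights K queries out) := by unfold Spec_count_qualifying_pairs; infer_instance

-- ===== CLAIM (what is proved, stated in full; the proofs are below) =====
def Claim_equal_count_qualifying_pairs : Prop := ∀ (heights : List Int) (K : Int) (queries : List (Int × Int)), Dom_count_qualifying_pairs heights K queries → Pre_count_qualifying_pairs heights K queries → Spec_count_qualifying_pairs heights K queries (count_qualifying_pairs heights K queries)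

-- ===== LEMMAS AND PROOFS =====

def pvPC (K : Int) : List Int → Int
  | [] => 0
  | x :: xs => (xs.countP (fun y => decide (|x - y| ≤ K)) : Int) + pvPC K xs

def pvTau (H : List Int) (K : Int) (i d : Nat) : Int :=
  (((H.drop (i + 1)).take d).countP (fun y => decide (|H.getD i 0 - y| ≤ K)) : Int)

def pvRS (K : Int) : List Int → List Int → Int
  | _, [] => 0
  | pre, x :: xs => (pre.countP (fun y => decide (|x - y| ≤ K)) : Int) + pvRS K (pre ++ [x]) xs

theorem pvPC_perm (K : Int) {l l' : List Int} (h : l.Perm l') : pvPC K l = pvPC K l' := by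
  induction h with
  | nil => rfl
  | cons x h ih => simp [pvPC, h.countP_eq, ih]
  | swap x y l =>
      simp only [pvPC, List.countP_cons]
      have : (decide (|x - y| ≤ K)) = (decide (|y - x| ≤ K)) := by rw [abs_sub_comm]
      rw [this]; push_cast; ring
  | trans h1 h2 ih1 ih2 => omega


theorem pvPC_neg (K : Int) (hK : K < 0) (l : List Int) : pvPC K l = 0 := by
  induction l with
  | nil => rfl
  | cons x xs ih =>
      have : xs.countP (fun y => decide (|x - y| ≤ K)) = 0 := by
        apply List.countP_eq_zero.2
        intro y _
        simp only [decide_eq_true_eq]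
        intro hc
        have := abs_nonneg (x - y)
        omega
      simp [pvPC, this, ih]


theorem pv_getD_set_self {α : Type} (M : List α) (k : Nat) (r d : α) (h : k < M.length) :
    (M.set k r).getD k d = r := by
  rw [List.getD_eq_getElem?_getD, List.getElem?_set_self h, Option.getD_some]


theorem pv_getD_set_ne {α : Type} (M : List α) (k i : Nat) (r d : α) (h : k ≠ i) :
    (M.set k r).getD i d = M.getD i d := by
  rw [List.getD_eq_getElem?_getD, List.getElem?_set_ne h, ← List.getD_eq_getElem?_getD]


theorem pv_inner (H : List Int) (K : Int) (i : Nat) :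
  ∀ (c s : Nat) (n0 : Int) (row : List Int),
    H.length - s = c → i < s → s ≤ H.length →
    row.length = H.length - i →
    n0 = pvTau H K i (s - 1 - i) →
    (∀ d : Nat, 1 ≤ d → d ≤ s - 1 - i → row.getD d 0 = pvTau H K i d) →
    (((PySem.List.pyRange (s : Int) (H.length : Int) 1).foldl
        (pvAInner H K (i : Int) (H.getD i 0)) (n0, row)).2.length = H.length - i ∧
     ∀ d : Nat, 1 ≤ d → d ≤ H.length - 1 - i →
       ((PySem.List.pyRange (s : Int) (H.length : Int) 1).foldl
        (pvAInner H K (i : Int) (H.getD i 0)) (n0, row)).2.getD d 0 = pvTau H K i d) := by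
  intro c
  induction c with
  | zero =>
      intro s n0 row hc his hsl hrl hn0 hrow
      have hs : s = H.length := by omega
      subst hs
      rw [PySem.List.pyRange_one_eq_nil (le_refl _)]
      exact ⟨hrl, fun d h1 h2 => hrow d h1 (by omega)⟩
  | succ c ih =>
      intro s n0 row hc his hsl hrl hn0 hrow
      have hslt : s < H.length := by omega
      have hcast : ((s : Int)) < ((H.length : Int)) := by exact_mod_cast hslt
      rw [PySem.List.pyRange_one_cons hcast]
      rw [List.foldl_cons]
      have hstep : pvAInner H K (i : Int) (H.getD i 0) (n0, row) (s : Int) =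
          (pvTau H K i (s - i), row.set (s - i) (pvTau H K i (s - i))) := by
        have hget : PySem.List.pyGetD H (s : Int) 0 = H.getD s 0 := by
          simp [PySem.List.pyGetD_natCast]
        have hnum : (if |H.getD i 0 - H.getD s 0| ≤ K then n0 + 1 else n0) = pvTau H K i (s - i) := by
          have hsi : s - i = (s - 1 - i) + 1 := by omega
          have htake : (H.drop (i + 1)).take (s - i) =
              (H.drop (i + 1)).take (s - 1 - i) ++ [H.getD s 0] := by
            rw [hsi, List.take_succ]
            congr 1
            have : (H.drop (i + 1))[s - 1 - i]? = some (H.getD s 0) := by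
              rw [List.getElem?_drop]
              have : i + 1 + (s - 1 - i) = s := by omega
              rw [this]
              rw [List.getElem?_eq_getElem hslt]
              simp [List.getD, List.getElem?_eq_getElem hslt]
            simp [this]
          unfold pvTau
          rw [htake, List.countP_append, hn0]
          unfold pvTau
          simp only [List.countP_cons, List.countP_nil, decide_eq_true_eq]
          split_ifs with hab <;> push_cast <;> ring
        have hidx : ((s : Int) - (i : Int)) = (((s - i : Nat)) : Int) := by omega
        simp only [pvAInner, hget, hnum, hidx, PySem.List.pySetD_natCast]
      rw [hstep]
      have hpush : ((s : Int)) + 1 = (((s + 1 : Nat)) : Int) := by push_cast; ring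
      rw [hpush]
      apply ih (s + 1)
      · omega
      · omega
      · omega
      · simp [hrl]
      · have h9 : (s + 1) - 1 - i = s - i := by omega
        rw [h9]
      · intro d h1 h2
        have hlt : s - i < row.length := by omega
        by_cases hd : d = s - i
        · subst hd
          rw [List.getD_eq_getElem?_getD, List.getElem?_set_self (by omega)]
          simp
        · rw [List.getD_eq_getElem?_getD, List.getElem?_set_ne (by omega)]
          rw [← List.getD_eq_getElem?_getD]
          exact hrow d h1 (by omega)


theorem pv_outer (H : List Int) (K : Int) :
  ∀ (c k : Nat) (M : List (List Int)),
    H.length - k = c → k ≤ H.length →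
    M.length = H.length →
    (∀ i : Nat, i < H.length → k ≤ i → M.getD i [] = List.replicate (H.length - i) 0) →
    (∀ i : Nat, i < k → ∀ d : Nat, 1 ≤ d → d ≤ H.length - 1 - i →
        (M.getD i []).getD d 0 = pvTau H K i d) →
    ∀ i : Nat, i < H.length → ∀ d : Nat, 1 ≤ d → d ≤ H.length - 1 - i →
      (((PySem.List.enumerate (H.drop k) (k : Int)).foldl (pvAOuter H K) M).getD i []).getD d 0 = pvTau H K i d := by
  intro c
  induction c with
  | zero =>
      intro k M hc hk hlen hrep hdone i hi d h1 h2
      have hkl : k = H.length := by omega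
      subst hkl
      rw [List.drop_length]
      simpa using hdone i (by omega) d h1 h2
  | succ c ih =>
      intro k M hc hk hlen hrep hdone i hi d h1 h2
      have hklt : k < H.length := by omega
      rw [List.drop_eq_getElem_cons hklt, PySem.List.enumerate_cons, List.foldl_cons]
      have hstep : pvAOuter H K M ((k : Int), H[k]) =
          M.set k (((PySem.List.pyRange ((k : Nat) + 1 : Nat) (H.length : Int) 1).foldl
            (pvAInner H K (k : Int) (H.getD k 0)) (0, List.replicate (H.length - k) 0)).2) := by
        unfold pvAOuter
        have hM : PySem.List.pyGetD M ((k : Nat) : Int) [] = List.replicate (H.length - k) 0 := by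
          rw [PySem.List.pyGetD_natCast]
          rw [List.getD_eq_getElem?_getD]
          rw [← List.getD_eq_getElem?_getD]
          exact hrep k hklt (le_refl _)
        have hgk : H[k] = H.getD k 0 := by
          rw [List.getD_eq_getElem _ _ hklt]
        have hcast : ((k : Int) + 1) = (((k + 1 : Nat)) : Int) := by push_cast; ring
        simp only [hM, hgk, hcast, PySem.List.pySetD_natCast]
      rw [hstep]
      have hrow := pv_inner H K k (H.length - (k + 1)) (k + 1) 0 (List.replicate (H.length - k) 0)
        rfl (by omega) (by omega) (by simp) (by simp [pvTau]) (by omega)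
      have hcast2 : ((k : Int) + 1) = (((k + 1 : Nat)) : Int) := by push_cast; ring
      rw [hcast2]
      apply ih (k + 1) _ (by omega) (by omega) (by simp [hlen])
      · intro i' hi' hki'
        rw [pv_getD_set_ne _ _ _ _ _ (by omega)]
        exact hrep i' hi' (by omega)
      · intro i' hi' d' hd1 hd2
        by_cases hik : i' = k
        · subst hik
          rw [pv_getD_set_self _ _ _ _ (by omega)]
          exact hrow.2 d' hd1 hd2
        · rw [pv_getD_set_ne _ _ _ _ _ (by omega)]
          exact hdone i' (by omega) d' hd1 hd2
      · exact hi
      · exact h1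
      · exact h2


def pvFights (H : List Int) (K : Int) : List (List Int) :=
  (PySem.List.enumerate H 0).foldl (pvAOuter H K)
    ((PySem.List.pyRange 0 (H.length : Int) 1).map (fun i => List.replicate ((H.length : Int) - i).toNat 0))


theorem pvF_entry (H : List Int) (K : Int) (i d : Nat) (hi : i < H.length) (h1 : 1 ≤ d)
    (h2 : d ≤ H.length - 1 - i) : ((pvFights H K).getD i []).getD d 0 = pvTau H K i d := by
  have h := pv_outer H K H.length 0
    ((PySem.List.pyRange 0 (H.length : Int) 1).map (fun j => List.replicate ((H.length : Int) - j).toNat 0))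
    (by omega) (by omega) (by simp [PySem.List.length_pyRange_one]) ?_ (by omega)
  · have : PySem.List.enumerate (H.drop 0) ((0 : Nat) : Int) = PySem.List.enumerate H 0 := by norm_num
    rw [this] at h
    exact h i hi d h1 h2
  · intro j hj _
    rw [List.getD_eq_getElem?_getD, PySem.List.getElem?_map_pyRange_zero _ _ _ hj, Option.getD_some]
    congr 1
    omega


theorem pvPC_take_one (K : Int) (l : List Int) : pvPC K (l.take 1) = 0 := by
  cases l <;> simp [pvPC]


theorem pvA_sum (H : List Int) (K : Int) :
  ∀ (c a b : Nat) (acc : Int), b - a = c → a ≤ b → b < H.length →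
    (PySem.List.pyRange (a : Int) (b : Int) 1).foldl
      (fun acc sumo => acc + PySem.List.pyGetD (PySem.List.pyGetD (pvFights H K) sumo []) ((b : Int) - sumo) 0) acc
    = acc + pvPC K ((H.drop a).take (b - a + 1)) := by
  intro c
  induction c with
  | zero =>
      intro a b acc hc hab hb
      have : a = b := by omega
      subst this
      rw [PySem.List.pyRange_one_eq_nil (le_refl _)]
      simp [pvPC_take_one]
  | succ c ih =>
      intro a b acc hc hab hb
      have halt : a < b := by omega
      have hcast : ((a : Int)) < ((b : Int)) := by exact_mod_cast halt
      rw [PySem.List.pyRange_one_cons hcast, List.foldl_cons]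
      have hterm : PySem.List.pyGetD (PySem.List.pyGetD (pvFights H K) ((a : Nat) : Int) []) ((b : Int) - (a : Int)) 0
          = pvTau H K a (b - a) := by
        rw [PySem.List.pyGetD_natCast]
        have : ((b : Int) - (a : Int)) = (((b - a : Nat)) : Int) := by omega
        rw [this, PySem.List.pyGetD_natCast]
        exact pvF_entry H K a (b - a) (by omega) (by omega) (by omega)
      rw [hterm]
      have hcast2 : ((a : Int)) + 1 = (((a + 1 : Nat)) : Int) := by push_cast; ring
      rw [hcast2, ih (a + 1) b _ (by omega) (by omega) hb]
      have hsplit : (H.drop a).take (b - a + 1) = H.getD a 0 :: (H.drop (a + 1)).take (b - a) := by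
        rw [List.drop_eq_getElem_cons (show a < H.length by omega)]
        rw [List.take_cons (by omega : 0 < b - a + 1)]
        rw [List.getD_eq_getElem _ _ (by omega : a < H.length)]
        have h8 : b - a + 1 - 1 = b - a := by omega
        rw [h8]
      rw [hsplit]
      simp only [pvPC]
      have : b - (a + 1) + 1 = b - a := by omega
      rw [this]
      simp only [pvTau]
      ring


theorem pvBisect_spec (w : List Int) (t : Int) (hsort : w.Pairwise (· ≤ ·)) :
  ∀ (n lo hi : Nat), hi - lo = n → hi ≤ w.length →
    lo ≤ pvBisect w t lo hi ∧ pvBisect w t lo hi ≤ max lo hi ∧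
    (∀ a : Nat, lo ≤ a → a < pvBisect w t lo hi → w.getD a 0 < t) ∧
    (∀ a : Nat, pvBisect w t lo hi ≤ a → a < hi → ¬ w.getD a 0 < t) := by
  have hmono : ∀ (a b : Nat), a ≤ b → b < w.length → w.getD a 0 ≤ w.getD b 0 := by
    intro a b hab hb
    rcases Nat.eq_or_lt_of_le hab with h | h
    · subst h; exact le_refl _
    · rw [List.getD_eq_getElem _ _ (by omega), List.getD_eq_getElem _ _ hb]
      exact (List.pairwise_iff_getElem.1 hsort) a b (by omega) hb h
  intro n
  induction n using Nat.strong_induction_on with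
  | _ n ih =>
    intro lo hi hn hhi
    unfold pvBisect
    by_cases hlh : lo < hi
    · simp only [hlh, dite_true]
      have hmid1 : lo ≤ (lo + hi) / 2 := by omega
      have hmid2 : (lo + hi) / 2 < hi := by omega
      have hgetm : PySem.List.pyGetD w (((lo + hi) / 2 : Nat) : Int) 0 = w.getD ((lo + hi) / 2) 0 := by
        rw [PySem.List.pyGetD_natCast]
      rw [hgetm]
      by_cases hcmp : w.getD ((lo + hi) / 2) 0 < t
      · simp only [hcmp, if_true]
        obtain ⟨h1, h2, h3, h4⟩ := ih (hi - ((lo + hi) / 2 + 1)) (by omega) ((lo + hi) / 2 + 1) hi rfl hhi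
        refine ⟨by omega, by omega, ?_, ?_⟩
        · intro a ha1 ha2
          by_cases hc : (lo + hi) / 2 + 1 ≤ a
          · exact h3 a hc ha2
          · calc w.getD a 0 ≤ w.getD ((lo + hi) / 2) 0 := hmono a _ (by omega) (by omega)
              _ < t := hcmp
        · exact h4
      · simp only [hcmp, if_false]
        obtain ⟨h1, h2, h3, h4⟩ := ih ((lo + hi) / 2 - lo) (by omega) lo ((lo + hi) / 2) rfl (by omega)
        refine ⟨h1, by omega, ?_, ?_⟩
        · intro a ha1 ha2; exact h3 a ha1 ha2
        · intro a ha1 ha2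
          by_cases hc : a < (lo + hi) / 2
          · exact h4 a ha1 hc
          · intro hlt
            have := hmono ((lo + hi) / 2) a (by omega) (by omega)
            omega
    · simp only [hlh, dite_false]
      exact ⟨le_refl _, by omega, fun a h1 h2 => by omega, fun a h1 h2 => by omega⟩

theorem pv_contrib (w : List Int) (K : Int) (hsort : w.Pairwise (· ≤ ·)) (m : Nat) (hm : m < w.length) :
    ((m : Int) - (pvBisect w (w.getD m 0 - K) 0 m : Int)) =
      ((w.take m).countP (fun y => decide (|w.getD m 0 - y| ≤ K)) : Int) := by
  have hgm : ∀ (a : Nat), a ≤ m → w.getD a 0 ≤ w.getD m 0 := by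
    intro a ha
    rcases Nat.eq_or_lt_of_le ha with h | h
    · subst h; exact le_refl _
    · rw [List.getD_eq_getElem _ _ (by omega), List.getD_eq_getElem _ _ hm]
      exact (List.pairwise_iff_getElem.1 hsort) a m (by omega) hm h
  obtain ⟨h1, h2, h3, h4⟩ := pvBisect_spec w (w.getD m 0 - K) hsort m 0 m (by omega) (by omega)
  set lo := pvBisect w (w.getD m 0 - K) 0 m with hlo
  have hlom : lo ≤ m := by omega
  have hsplit : w.take m = (w.take m).take lo ++ (w.take m).drop lo := (List.take_append_drop _ _).symm
  rw [hsplit, List.countP_append]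
  have hz : (w.take m).take lo = w.take lo := by rw [List.take_take, min_eq_left hlom]
  have hc1 : (w.take lo).countP (fun y => decide (|w.getD m 0 - y| ≤ K)) = 0 := by
    apply List.countP_eq_zero.2
    intro y hy
    rw [List.mem_take_iff_getElem] at hy
    obtain ⟨a, ha, rfl⟩ := hy
    have halo : a < lo := by omega
    have hya : w[a] = w.getD a 0 := by rw [List.getD_eq_getElem _ _ (by omega)]
    have hlt := h3 a (by omega) halo
    have hle := hgm a (by omega)
    simp only [decide_eq_true_eq]
    rw [hya]
    intro hcon
    rw [abs_le] at hcon
    omega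
  have hc2 : ((w.take m).drop lo).countP (fun y => decide (|w.getD m 0 - y| ≤ K)) =
      ((w.take m).drop lo).length := by
    apply List.countP_eq_length.2
    intro y hy
    rw [List.mem_iff_getElem] at hy
    obtain ⟨a, ha, rfl⟩ := hy
    have hlen : ((w.take m).drop lo).length = m - lo := by
      rw [List.length_drop, List.length_take]; omega
    have hidx : ((w.take m).drop lo)[a] = w.getD (lo + a) 0 := by
      rw [List.getElem_drop, List.getElem_take, List.getD_eq_getElem _ _ (by omega)]
    have hge := h4 (lo + a) (by omega) (by omega)
    have hle := hgm (lo + a) (by omega)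
    rw [hidx]
    simp only [decide_eq_true_eq]
    rw [abs_le]
    omega
  rw [hz, hc1, hc2, List.length_drop, List.length_take]
  omega


theorem pv_sum_ind (x : Int) (K : Int) (xs : List Int) :
    (xs.map (fun y => if decide (|y - x| ≤ K) then (1 : Int) else 0)).sum
      = (xs.countP (fun y => decide (|x - y| ≤ K)) : Int) := by
  induction xs with
  | nil => simp
  | cons z zs ih =>
      simp only [List.map_cons, List.sum_cons, List.countP_cons, ih, abs_sub_comm z x]
      by_cases h : |x - z| ≤ K <;> simp [h] <;> push_cast <;> ring


theorem pvRS_pc (K : Int) : ∀ (rest pre : List Int),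
    pvRS K pre rest = (rest.map (fun x => (pre.countP (fun y => decide (|x - y| ≤ K)) : Int))).sum + pvPC K rest := by
  intro rest
  induction rest with
  | nil => intro pre; simp [pvRS, pvPC]
  | cons x xs ih =>
      intro pre
      simp only [pvRS, pvPC, ih (pre ++ [x]), List.map_cons, List.sum_cons]
      have hsplit : ∀ y : Int, ((pre ++ [x]).countP (fun z => decide (|y - z| ≤ K)) : Int)
          = (pre.countP (fun z => decide (|y - z| ≤ K)) : Int) + (if decide (|y - x| ≤ K) then (1:Int) else 0) := by
        intro y
        rw [List.countP_append]
        push_cast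
        simp only [List.countP_cons, List.countP_nil]
        by_cases h : decide (|y - x| ≤ K) = true <;> simp [h]
      have hmap : (xs.map (fun y => ((pre ++ [x]).countP (fun z => decide (|y - z| ≤ K)) : Int))).sum
          = (xs.map (fun y => (pre.countP (fun z => decide (|y - z| ≤ K)) : Int))).sum
            + (xs.map (fun y => if decide (|y - x| ≤ K) then (1:Int) else 0)).sum := by
        rw [← List.sum_map_add]
        apply congrArg
        apply List.map_congr_left
        intro y _
        exact hsplit y
      rw [hmap, pv_sum_ind x K xs]
      ring


theorem pvRS_one (K : Int) (w : List Int) : pvRS K (w.take 1) (w.drop 1) = pvPC K w := by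
  cases w with
  | nil => simp [pvRS, pvPC]
  | cons x xs =>
      simp only [List.take_succ_cons, List.take_zero, List.drop_succ_cons, List.drop_zero]
      have h := pvRS_pc K xs [x]
      have hmap : (xs.map (fun y => (([x] : List Int).countP (fun z => decide (|y - z| ≤ K)) : Int))).sum
          = (xs.map (fun y => if decide (|y - x| ≤ K) then (1:Int) else 0)).sum := by
        apply congrArg
        apply List.map_congr_left
        intro y _
        simp only [List.countP_cons, List.countP_nil]
        by_cases hb : decide (|y - x| ≤ K) = true <;> simp [hb]
      rw [h, hmap, pv_sum_ind x K xs, pvPC]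


theorem pvB_sum (w : List Int) (K : Int) (hsort : w.Pairwise (· ≤ ·)) :
  ∀ (c m : Nat) (acc : Int), w.length - m = c → m ≤ w.length →
    (PySem.List.pyRange (m : Int) (w.length : Int) 1).foldl
      (fun total j => total + (j - (pvBisect w (PySem.List.pyGetD w j 0 - K) 0 j.toNat : Int))) acc
    = acc + pvRS K (w.take m) (w.drop m) := by
  intro c
  induction c with
  | zero =>
      intro m acc hc hm
      have : m = w.length := by omega
      subst this
      rw [PySem.List.pyRange_one_eq_nil (le_refl _)]
      simp [pvRS, List.drop_length]
  | succ c ih =>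
      intro m acc hc hm
      have hmlt : m < w.length := by omega
      have hcast : ((m : Int)) < ((w.length : Int)) := by exact_mod_cast hmlt
      rw [PySem.List.pyRange_one_cons hcast, List.foldl_cons]
      have hget : PySem.List.pyGetD w ((m : Nat) : Int) 0 = w.getD m 0 := by
        rw [PySem.List.pyGetD_natCast]
      have htonat : ((m : Int)).toNat = m := by omega
      rw [hget, htonat]
      rw [pv_contrib w K hsort m hmlt]
      have hcast2 : ((m : Int)) + 1 = (((m + 1 : Nat)) : Int) := by push_cast; ring
      rw [hcast2, ih (m + 1) _ (by omega) (by omega)]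
      have hdrop : w.drop m = w.getD m 0 :: w.drop (m + 1) := by
        rw [List.drop_eq_getElem_cons hmlt, List.getD_eq_getElem _ _ hmlt]
      have htake : w.take (m + 1) = w.take m ++ [w.getD m 0] := by
        rw [List.getD_eq_getElem _ _ hmlt]
        rw [List.take_add_one]
        simp [List.getElem?_eq_getElem hmlt]
      rw [hdrop, pvRS, htake]
      ring


-- per-query values of the two ports
def pvValA (H : List Int) (K : Int) (q : Int × Int) : Int :=
  (PySem.List.pyRange q.1 q.2 1).foldl
    (fun acc sumo => acc + PySem.List.pyGetD (PySem.List.pyGetD (pvFights H K) sumo []) (q.2 - sumo) 0) 0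

def pvValB (H : List Int) (K : Int) (q : Int × Int) : Int :=
  if q.1 ≥ q.2 ∨ K < 0 then 0
  else
    (PySem.List.pyRange 1 (((PySem.List.sorted (PySem.List.slice H (some q.1) (some (q.2 + 1))) (fun x => x) false).length : Int)) 1).foldl
      (fun total j => total + (j - (pvBisect (PySem.List.sorted (PySem.List.slice H (some q.1) (some (q.2 + 1))) (fun x => x) false)
        (PySem.List.pyGetD (PySem.List.sorted (PySem.List.slice H (some q.1) (some (q.2 + 1))) (fun x => x) false) j 0 - K) 0 j.toNat : Int))) 0

theorem pvA_fold (H : List Int) (K : Int) :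
    ∀ (qs : List (Int × Int)) (res : List Int),
      qs.foldl (fun results q => results ++ [pvValA H K q]) res = res ++ qs.map (pvValA H K) := by
  intro qs
  induction qs with
  | nil => intro res; simp
  | cons q qs ih => intro res; rw [List.foldl_cons, ih]; simp

theorem pvB_fold (H : List Int) (K : Int) :
    ∀ (qs : List (Int × Int)) (res : List Int),
      qs.foldl (fun results q =>
        if q.1 ≥ q.2 ∨ K < 0 then results ++ [0]
        else
          let w := PySem.List.sorted (PySem.List.slice H (some q.1) (some (q.2 + 1))) (fun x => x) false
          let total := (PySem.List.pyRange 1 (w.length : Int) 1).foldl (fun total j =>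
              let target := PySem.List.pyGetD w j 0 - K
              let lo := pvBisect w target 0 j.toNat
              total + (j - (lo : Int))) 0
          results ++ [total]) res = res ++ qs.map (pvValB H K) := by
  intro qs
  induction qs with
  | nil => intro res; simp
  | cons q qs ih =>
      intro res
      rw [List.foldl_cons]
      by_cases h : q.1 ≥ q.2 ∨ K < 0
      · simp only [h, if_true]
        rw [ih]
        simp [pvValB, h]
      · simp only [h, if_false]
        rw [ih]
        simp [pvValB, h]

theorem pv_qval (H : List Int) (K : Int) (q : Int × Int)
    (hq : q.2 ≤ q.1 ∨ (0 ≤ q.1 ∧ q.2 < (H.length : Int))) : pvValA H K q = pvValB H K q := by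
  by_cases hle : q.2 ≤ q.1
  · unfold pvValA pvValB
    rw [PySem.List.pyRange_one_eq_nil hle]
    simp [hle, ge_iff_le]
  · have h0 : 0 ≤ q.1 ∧ q.2 < (H.length : Int) := hq.resolve_left hle
    have ha : q.1 = ((q.1.toNat : Nat) : Int) := by omega
    have hb : q.2 = ((q.2.toNat : Nat) : Int) := by omega
    set a := q.1.toNat with hadef
    set b := q.2.toNat with hbdef
    have hab : a < b := by omega
    have hblen : b < H.length := by omega
    have hA : pvValA H K q = pvPC K ((H.drop a).take (b - a + 1)) := by
      unfold pvValA
      rw [ha, hb]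
      rw [pvA_sum H K (b - a) a b 0 rfl (by omega) hblen]
      ring
    set w := PySem.List.sorted (PySem.List.slice H (some q.1) (some (q.2 + 1))) (fun x => x) false with hwdef
    have hslice : PySem.List.slice H (some q.1) (some (q.2 + 1)) = (H.drop a).take (b - a + 1) := by
      have h1 : (0 : Int) ≤ q.1 := by omega
      have h2 : (0 : Int) ≤ q.2 + 1 := by omega
      rw [PySem.List.slice_toNat H h1 h2]
      congr 1
      omega
    have hperm : w.Perm ((H.drop a).take (b - a + 1)) := by
      rw [← hslice]
      exact PySem.List.sorted_perm _ _ _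
    by_cases hK : K < 0
    · have hBB : pvValB H K q = 0 := by
        unfold pvValB
        simp [hK]
      rw [hA, hBB, pvPC_neg K hK]
    · have hsort : w.Pairwise (· ≤ ·) := by
        have := PySem.List.sorted_pairwise (PySem.List.slice H (some q.1) (some (q.2 + 1))) (fun x => x)
        simpa using this
      have hwlen : 1 ≤ w.length := by
        have h1 : w.length = ((H.drop a).take (b - a + 1)).length := hperm.length_eq
        rw [h1, List.length_take, List.length_drop]
        omega
      have hBB : pvValB H K q = pvPC K w := by
        have hcond : ¬(q.1 ≥ q.2 ∨ K < 0) := by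
          push_neg
          exact ⟨by omega, by omega⟩
        have hps := pvB_sum w K hsort (w.length - 1) 1 0 (by omega) (by omega)
        rw [Nat.cast_one] at hps
        unfold pvValB
        rw [if_neg hcond, ← hwdef, hps, pvRS_one]
        ring
      rw [hA, hBB, pvPC_perm K hperm]

-- ===== VERDICT (by name: the statement is the Claim_ definition above) =====
theorem count_qualifying_pairs_spec : Claim_equal_count_qualifying_pairs := by
  intro heights K queries _ hpre
  unfold Spec_count_qualifying_pairs
  have hA : count_qualifying_pairs heights K queries
      = queries.foldl (fun results q => results ++ [pvValA heights K q]) [] := rfl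
  have hB : count_qualifying_pairs_alt heights K queries
      = queries.foldl (fun results q =>
          if q.1 ≥ q.2 ∨ K < 0 then results ++ [0]
          else
            let w := PySem.List.sorted (PySem.List.slice heights (some q.1) (some (q.2 + 1))) (fun x => x) false
            let total := (PySem.List.pyRange 1 (w.length : Int) 1).foldl (fun total j =>
                let target := PySem.List.pyGetD w j 0 - K
                let lo := pvBisect w target 0 j.toNat
                total + (j - (lo : Int))) 0
            results ++ [total]) [] := rfl
  rw [hA, hB, pvA_fold, pvB_fold]
  simp only [List.nil_append]
  apply List.map_congr_left
  intro q hqmem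
  exact pv_qval heights K q (hpre q hqmem)
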